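-- pv_equiv track=rewrite | github.com/99percentcocoa/paperplus-generator | distractors.py | add_instead_of_multiply
-- ===== SOURCE A (Python) =====
-- def get_terms(question, correct_ans):
--     terms = question.split()
--     num1 = int(terms[0])
--     num2 = int(terms[-1])
--     if num1 < num2:
--         num1, num2 = num2, num1
--     return [num1, num2, int(correct_ans)]
--
-- def add_instead_of_multiply(question, correct_ans):
--     num1, num2, correct_ans = get_terms(question, correct_ans)
--     distractors = set()
--
--     # Simulate long multiplication, but add the digit instead of multiplying it
--     total = 0
--     for idx, ch in enumerate(reversed(str(abs(num2)))):
--         d = int(ch)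
--         partial = num1 + d           # mistaken operation: add digit instead of multiply
--         total += partial * (10 ** idx)  # shift by place value
--
--     if total != correct_ans:
--         distractors.add(total)
--
--     return list(distractors)
-- ===== SOURCE B (Python) =====
-- def add_instead_of_multiply(question, correct_ans):
--     # Closed form: sum((num1+d)*10**i) over digits d of abs(num2) equals
--     # num1 * repunit(width) + abs(num2), where repunit(w) = (10**w - 1)//9.
--     words = question.split()
--     a, b = int(words[0]), int(words[-1])
--     hi, lo = max(a, b), min(a, b)
--     total = hi * ((10 ** len(str(abs(lo))) - 1) // 9) + abs(lo)
--     return [] if total == int(correct_ans) else [total]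
-- ===== Notes on version B (the rewrite author's own statement) =====
-- stated objective: simpler
-- what changed: Dropped the get_terms helper and the distractors set, parsed the two terms inline with max/min, and replaced the digit-by-digit long-multiplication loop with the algebraic closed form total = hi * (10**width - 1)//9 + abs(lo), returning [] or [total] directly.
import Mathlib
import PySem

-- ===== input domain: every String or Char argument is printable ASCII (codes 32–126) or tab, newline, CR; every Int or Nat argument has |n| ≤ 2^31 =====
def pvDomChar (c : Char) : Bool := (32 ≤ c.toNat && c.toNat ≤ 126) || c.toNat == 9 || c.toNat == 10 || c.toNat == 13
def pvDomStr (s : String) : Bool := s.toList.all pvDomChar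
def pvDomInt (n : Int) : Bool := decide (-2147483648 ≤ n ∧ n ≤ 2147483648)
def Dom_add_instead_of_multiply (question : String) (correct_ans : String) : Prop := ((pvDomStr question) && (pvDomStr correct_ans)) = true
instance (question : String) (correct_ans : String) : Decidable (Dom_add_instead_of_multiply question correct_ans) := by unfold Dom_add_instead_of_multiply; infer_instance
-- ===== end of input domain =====

-- B drops the get_terms helper and the distractors set, parses the two terms inline with
-- max/min, and replaces the digit loop with the closed form hi * repunit(width) + |lo|
-- (objective: simpler).

-- ===== PORT A =====
-- get_terms, module helper of A. 'none' = the Python raised (IndexError on no words,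
-- ValueError on a non-int word / correct_ans); those inputs are excluded by Pre_ below.
def getTerms (question : String) (correct_ans : String) : Option (Int × Int × Int) :=
  let terms := PySem.Str.split₀ question
  match PySem.List.pyGet? terms 0, PySem.List.pyGet? terms (-1), PySem.Int.ofStr? correct_ans with
  | some t0, some tl, some ca =>
    match PySem.Int.ofStr? t0, PySem.Int.ofStr? tl with
    | some num1, some num2 =>
      if num1 < num2 then some (num2, num1, ca) else some (num1, num2, ca)
    | _, _ => none
  | _, _, _ => none

def add_instead_of_multiply (question : String) (correct_ans : String) : List Int :=
  match getTerms question correct_ans with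
  | none => []  -- unreachable under Pre_
  | some (num1, num2, correct_ans) =>
    let distractors : PySem.Set Int := PySem.Set.empty
    -- for idx, ch in enumerate(reversed(str(abs(num2)))): total += (num1 + int(ch)) * 10**idx
    -- int(ch) ported as (ofChars? [ch]).getD 0: never none, every ch is a decimal digit;
    -- 10**idx ported as 10 ^ idx.toNat: enumerate indices are nonnegative.
    let total : Int :=
      (PySem.List.enumerate (PySem.Int.toChars |num2|).reverse 0).foldl
        (fun total p => total + (num1 + (PySem.Int.ofChars? [p.2]).getD 0) * 10 ^ p.1.toNat) 0
    let distractors := if total ≠ correct_ans then PySem.Set.add distractors total else distractors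
    distractors

-- ===== PORT B =====
def add_instead_of_multiply_alt (question : String) (correct_ans : String) : List Int :=
  let words := PySem.Str.split₀ question
  -- int(words[0]) / int(words[-1]) / int(correct_ans): 'none' = the Python raised, excluded by Pre_.
  match (PySem.List.pyGet? words 0).bind PySem.Int.ofStr?,
        (PySem.List.pyGet? words (-1)).bind PySem.Int.ofStr?,
        PySem.Int.ofStr? correct_ans with
  | some a, some b, some ca =>
    let hi := max a b
    let lo := min a b
    let total := hi * PySem.Int.floordiv (10 ^ (PySem.Int.toChars |lo|).length - 1) 9 + |lo|
    if total == ca then [] else [total]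
  | _, _, _ => []  -- unreachable under Pre_

-- ===== PRECONDITION & SPEC =====
-- Pre_: exactly the inputs where Python A returns normally — the question has at least one
-- whitespace-separated word, its first and last words parse as int, and correct_ans parses as int.
def Pre_add_instead_of_multiply (question : String) (correct_ans : String) : Prop :=
  PySem.Str.split₀ question ≠ [] ∧
  (PySem.Int.ofStr? ((PySem.Str.split₀ question).headD "")).isSome = true ∧
  (PySem.Int.ofStr? ((PySem.Str.split₀ question).getLastD "")).isSome = true ∧
  (PySem.Int.ofStr? correct_ans).isSome = true
instance (question : String) (correct_ans : String) : Decidable (Pre_add_instead_of_multiply question correct_ans) := by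
  unfold Pre_add_instead_of_multiply; infer_instance

def pvWitness_add_instead_of_multiply : String × String := ("97 * 46", "596")

def Spec_add_instead_of_multiply (question : String) (correct_ans : String) (out : List Int) : Prop := out = add_instead_of_multiply_alt question correct_ans
instance (question : String) (correct_ans : String) (out : List Int) : Decidable (Spec_add_instead_of_multiply question correct_ans out) := by unfold Spec_add_instead_of_multiply; infer_instance

-- ===== CLAIM (what is proved, stated in full; the proofs are below) =====
def Claim_equal_add_instead_of_multiply : Prop := ∀ (question : String) (correct_ans : String), Dom_add_instead_of_multiply question correct_ans → Pre_add_instead_of_multiply question correct_ans → Spec_add_instead_of_multiply question correct_ans (add_instead_of_multiply question correct_ans)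

-- ===== LEMMAS AND PROOFS =====

-- repunit k = the integer written with k ones
def repunit : Nat → Int
  | 0 => 0
  | k + 1 => 1 + 10 * repunit k

-- the little-endian digit list A's loop walks: str(abs n) reversed, as digit values
def dlist (m : Nat) : List Nat := if m = 0 then [0] else Nat.digits 10 m

theorem nine_mul_repunit (k : Nat) : 9 * repunit k = 10 ^ k - 1 := by
  induction k with
  | zero => simp [repunit]
  | succ k ih => rw [repunit]; push_cast [pow_succ]; linarith

theorem floordiv_repunit (k : Nat) : PySem.Int.floordiv (10 ^ k - 1) 9 = repunit k := by
  rw [PySem.Int.floordiv_eq_iff_of_pos (by norm_num)]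
  have h := nine_mul_repunit k
  constructor <;> linarith

theorem toDigitsCore_eq : ∀ (f n : Nat) (ds : List Char), n < f →
    Nat.toDigitsCore 10 f n ds = ((dlist n).map Nat.digitChar).reverse ++ ds := by
  intro f
  induction f with
  | zero => intro n ds h; omega
  | succ f ih =>
    intro n ds _h
    rw [Nat.toDigitsCore]
    by_cases h10 : n / 10 = 0
    · simp only [h10, if_true]
      have hn : n < 10 := by omega
      by_cases h0 : n = 0
      · subst h0; simp [dlist]
      · rw [dlist, if_neg h0, Nat.digits_def' (by norm_num) (Nat.pos_of_ne_zero h0), h10]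
        simp [Nat.mod_eq_of_lt hn]
    · simp only [h10, if_false]
      have hpos : 0 < n := by omega
      have hlt : n / 10 < f := by
        have := Nat.div_lt_self hpos (by norm_num : 1 < 10)
        omega
      rw [ih (n / 10) _ hlt]
      have hd : dlist n = n % 10 :: dlist (n / 10) := by
        unfold dlist
        rw [if_neg (by omega : ¬ n = 0), if_neg h10]
        exact Nat.digits_def' (by norm_num : 1 < 10) hpos
      rw [hd]
      simp

theorem toDigits_eq (m : Nat) : Nat.toDigits 10 m = ((dlist m).map Nat.digitChar).reverse := by
  rw [Nat.toDigits, toDigitsCore_eq (m + 1) m [] (by omega)]; simp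

theorem toChars_natCast (m : Nat) : PySem.Int.toChars (m : Int) = Nat.toDigits 10 m := by
  simp [PySem.Int.toChars]

theorem digit_val (d : Nat) (hd : d < 10) :
    (PySem.Int.ofChars? [Nat.digitChar d]).getD 0 = (d : Int) := by
  interval_cases d <;> decide

theorem dlist_lt (m : Nat) : ∀ d ∈ dlist m, d < 10 := by
  intro d hd
  unfold dlist at hd
  by_cases h0 : m = 0
  · simp [h0] at hd; omega
  · rw [if_neg h0] at hd
    exact Nat.digits_lt_base (by norm_num) hd

theorem ofDigits_int (l : List Nat) : Nat.ofDigits (10 : Int) l = ((Nat.ofDigits 10 l : Nat) : Int) := by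
  induction l with
  | nil => simp [Nat.ofDigits]
  | cons d ds ih => simp only [Nat.ofDigits]; rw [ih]; push_cast; ring

theorem ofDigits_dlist (m : Nat) : Nat.ofDigits (10 : Int) (dlist m) = (m : Int) := by
  rw [ofDigits_int]
  unfold dlist
  by_cases h0 : m = 0
  · simp [h0]
  · rw [if_neg h0, Nat.ofDigits_digits]

theorem loop_eq (num1 : Int) : ∀ (l : List Nat) (s : Nat) (t : Int), (∀ d ∈ l, d < 10) →
    (PySem.List.enumerate (l.map Nat.digitChar) (s : Int)).foldl
      (fun total p => total + (num1 + (PySem.Int.ofChars? [p.2]).getD 0) * 10 ^ p.1.toNat) t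
    = t + (num1 * repunit l.length + (Nat.ofDigits 10 l : Int)) * 10 ^ s := by
  intro l
  induction l with
  | nil => intro s t _; simp [PySem.List.enumerate_nil, repunit, Nat.ofDigits]
  | cons d ds ih =>
    intro s t hlt
    rw [List.map_cons, PySem.List.enumerate_cons, List.foldl_cons]
    have hcast : ((s : Int) + 1) = ((s + 1 : Nat) : Int) := by push_cast; ring
    rw [hcast, ih (s + 1) _ (fun x hx => hlt x (List.mem_cons_of_mem _ hx))]
    rw [digit_val d (hlt d (List.mem_cons_self))]
    have htn : ((s : Int)).toNat = s := Int.toNat_natCast s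
    rw [htn]
    simp only [List.length_cons, repunit, Nat.ofDigits]
    push_cast [pow_succ]
    ring

theorem total_eq (num1 num2 : Int) :
    (PySem.List.enumerate (PySem.Int.toChars |num2|).reverse 0).foldl
        (fun total p => total + (num1 + (PySem.Int.ofChars? [p.2]).getD 0) * 10 ^ p.1.toNat) 0
    = num1 * PySem.Int.floordiv (10 ^ (PySem.Int.toChars |num2|).length - 1) 9 + |num2| := by
  have habs : |num2| = ((num2.natAbs : Nat) : Int) := Int.abs_eq_natAbs num2
  set m := num2.natAbs with hm
  rw [habs, toChars_natCast, toDigits_eq]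
  rw [List.reverse_reverse]
  have hl := loop_eq num1 (dlist m) 0 0 (dlist_lt m)
  simp only [Nat.cast_zero, pow_zero, mul_one, zero_add] at hl
  rw [hl, ofDigits_dlist, floordiv_repunit]
  simp only [List.length_reverse, List.length_map]

-- ===== VERDICT (by name: the statement is the Claim_ definition above) =====
theorem add_instead_of_multiply_spec : Claim_equal_add_instead_of_multiply := by
  unfold Claim_equal_add_instead_of_multiply
  intro question correct_ans _dom pre
  obtain ⟨hne, h0, hl, hca⟩ := pre
  unfold Spec_add_instead_of_multiply add_instead_of_multiply add_instead_of_multiply_alt getTerms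
  simp only
  -- resolve the three parses, shared by both sides
  have hget0 : PySem.List.pyGet? (PySem.Str.split₀ question) 0
      = some ((PySem.Str.split₀ question).headD "") := by
    cases hq : PySem.Str.split₀ question with
    | nil => exact absurd hq hne
    | cons x xs => simp [PySem.List.pyGet?, PySem.List.pyIdx?]
  have hgetl : PySem.List.pyGet? (PySem.Str.split₀ question) (-1)
      = some ((PySem.Str.split₀ question).getLastD "") := by
    cases hq : PySem.Str.split₀ question with
    | nil => exact absurd hq hne
    | cons x xs =>
      obtain ⟨y, hy⟩ := Option.isSome_iff_exists.mp
        (by simp : (x :: xs).getLast?.isSome = true)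
      rw [PySem.List.pyGet?_neg_one, hy, List.getLastD_eq_getLast?, hy]
      rfl
  obtain ⟨n1, hn1⟩ := Option.isSome_iff_exists.mp h0
  obtain ⟨n2, hn2⟩ := Option.isSome_iff_exists.mp hl
  obtain ⟨ca, hca'⟩ := Option.isSome_iff_exists.mp hca
  rw [hget0, hgetl, hca']
  simp only [Option.bind_some, hn1, hn2]
  have key : ∀ (hi lo : Int),
      (if (PySem.List.enumerate (PySem.Int.toChars |lo|).reverse 0).foldl
            (fun total p => total + (hi + (PySem.Int.ofChars? [p.2]).getD 0) * 10 ^ p.1.toNat) 0 ≠ ca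
        then PySem.Set.add (PySem.Set.empty) ((PySem.List.enumerate (PySem.Int.toChars |lo|).reverse 0).foldl
            (fun total p => total + (hi + (PySem.Int.ofChars? [p.2]).getD 0) * 10 ^ p.1.toNat) 0)
        else PySem.Set.empty)
      = (if (hi * PySem.Int.floordiv (10 ^ (PySem.Int.toChars |lo|).length - 1) 9 + |lo|) == ca
         then ([] : List Int)
         else [hi * PySem.Int.floordiv (10 ^ (PySem.Int.toChars |lo|).length - 1) 9 + |lo|]) := by
    intro hi lo
    rw [total_eq hi lo]
    by_cases h : hi * PySem.Int.floordiv (10 ^ (PySem.Int.toChars |lo|).length - 1) 9 + |lo| = ca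
    · simp [PySem.Set.empty]
    · simp [PySem.Set.empty, PySem.Set.add, PySem.Set.contains]
  by_cases hlt : n1 < n2
  · have hmax : max n1 n2 = n2 := max_eq_right (le_of_lt hlt)
    have hmin : min n1 n2 = n1 := min_eq_left (le_of_lt hlt)
    simp only [if_pos hlt, hmax, hmin]
    exact key n2 n1
  · have hle : n2 ≤ n1 := le_of_not_gt hlt
    have hmax : max n1 n2 = n1 := max_eq_left hle
    have hmin : min n1 n2 = n2 := min_eq_right hle
    simp only [if_neg hlt, hmax, hmin]
    exact key n1 n2
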